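-- pv_equiv track=rewrite | github.com/sinnappan93/flappy_snake | flappy_snake/ville.py | coordonnees_rectangles
-- ===== SOURCE A (Python) =====
-- def un_rectange(h,l,hauteur_fenetre,d):
-- 	return [d,hauteur_fenetre-h,d+l,hauteur_fenetre]
--
-- def coordonnees_rectangles(hauteur,largeur,hauteur_fenetre):
-- 	lst_totale=[]
-- 	i=0
-- 	d=0   # d est le décalage pour les coords des rectangles
-- 	while i<len(hauteur):  #nombre d'éléments dans "hauteur", c-à-d aussi le nombre de rectangles
-- 		m=un_rectange(hauteur[i],largeur[i],hauteur_fenetre,d)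
-- 		d+=largeur[i]  #le décalage auquel on ajoute la largeur du rectangle précédent pour avoir la coordonnée en x du suivant
-- 		lst_totale.append(m)
-- 		i+=1
-- 	return lst_totale
-- ===== SOURCE B (Python) =====
-- def coordonnees_rectangles(hauteur, largeur, hauteur_fenetre):
--     offsets = [0]
--     for w in largeur:
--         offsets.append(offsets[-1] + w)
--     return [[x, hauteur_fenetre - h, x + w, hauteur_fenetre]
--             for x, h, w in zip(offsets, hauteur, largeur)]
-- ===== Notes on version B (the rewrite author's own statement) =====
-- stated objective: alternative
-- what changed: Replaces the single accumulator-threaded while loop with a two-pass decomposition: first build the full prefix-sum offset table of largeur, then zip it with hauteur and largeur and map each triple to its rectangle.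
import Mathlib
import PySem

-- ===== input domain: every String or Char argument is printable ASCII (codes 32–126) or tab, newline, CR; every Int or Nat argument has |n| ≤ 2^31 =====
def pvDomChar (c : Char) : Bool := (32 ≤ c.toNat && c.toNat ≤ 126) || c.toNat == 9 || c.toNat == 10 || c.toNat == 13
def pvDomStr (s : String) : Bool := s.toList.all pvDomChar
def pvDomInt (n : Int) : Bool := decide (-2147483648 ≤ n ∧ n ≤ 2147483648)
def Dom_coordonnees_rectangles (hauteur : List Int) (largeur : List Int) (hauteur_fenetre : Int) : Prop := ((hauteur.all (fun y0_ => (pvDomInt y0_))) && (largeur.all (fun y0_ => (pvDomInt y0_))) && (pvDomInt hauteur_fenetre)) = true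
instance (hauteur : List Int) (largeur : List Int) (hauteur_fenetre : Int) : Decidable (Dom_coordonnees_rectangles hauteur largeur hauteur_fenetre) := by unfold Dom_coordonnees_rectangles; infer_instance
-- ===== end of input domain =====

-- ===== PORT A =====
-- B differs from A where A raises IndexError (largeur shorter than hauteur): Pre_ excludes those inputs.
-- A's while loop over index i threading the offset d, with pyGet? indexing (none = IndexError, cut off as in Python).
def pvALoop (hauteur largeur : List Int) (hauteur_fenetre : Int) (i : Nat) (d : Int)
    (acc : List (List Int)) : List (List Int) :=
  if _h : i < hauteur.length then
    match PySem.List.pyGet? hauteur (i : Int), PySem.List.pyGet? largeur (i : Int) with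
    | some h, some l =>
        pvALoop hauteur largeur hauteur_fenetre (i + 1) (d + l)
          (acc ++ [[d, hauteur_fenetre - h, d + l, hauteur_fenetre]])
    | _, _ => acc   -- IndexError in Python; unreachable under Pre_
  else acc
termination_by hauteur.length - i

def coordonnees_rectangles (hauteur : List Int) (largeur : List Int) (hauteur_fenetre : Int) : List (List Int) :=
  pvALoop hauteur largeur hauteur_fenetre 0 0 []

-- ===== PORT B =====
-- offsets = [0]; for w in largeur: offsets.append(offsets[-1] + w)   (offsets is never empty, so getLastD 0 = offsets[-1])
def pvOffsets (largeur : List Int) : List Int :=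
  largeur.foldl (fun os w => os ++ [os.getLastD 0 + w]) [0]

def coordonnees_rectangles_alt (hauteur : List Int) (largeur : List Int) (hauteur_fenetre : Int) : List (List Int) :=
  ((pvOffsets largeur).zip (hauteur.zip largeur)).map
    (fun t => [t.1, hauteur_fenetre - t.2.1, t.1 + t.2.2, hauteur_fenetre])

-- ===== PRECONDITION & SPEC =====
-- Pre_ is exactly A's return domain: A raises IndexError when largeur has fewer elements than hauteur.
def Pre_coordonnees_rectangles (hauteur : List Int) (largeur : List Int) (hauteur_fenetre : Int) : Prop :=
  hauteur.length ≤ largeur.length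
instance (hauteur : List Int) (largeur : List Int) (hauteur_fenetre : Int) : Decidable (Pre_coordonnees_rectangles hauteur largeur hauteur_fenetre) := by unfold Pre_coordonnees_rectangles; infer_instance

def pvWitness_coordonnees_rectangles : List Int × List Int × Int := ([3, 5, 2], [4, 6, 1], 20)

def Spec_coordonnees_rectangles (hauteur : List Int) (largeur : List Int) (hauteur_fenetre : Int) (out : List (List Int)) : Prop := out = coordonnees_rectangles_alt hauteur largeur hauteur_fenetre
instance (hauteur : List Int) (largeur : List Int) (hauteur_fenetre : Int) (out : List (List Int)) : Decidable (Spec_coordonnees_rectangles hauteur largeur hauteur_fenetre out) := by unfold Spec_coordonnees_rectangles; infer_instance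

-- ===== CLAIM (what is proved, stated in full; the proofs are below) =====
def Claim_equal_coordonnees_rectangles : Prop := ∀ (hauteur : List Int) (largeur : List Int) (hauteur_fenetre : Int), Dom_coordonnees_rectangles hauteur largeur hauteur_fenetre → Pre_coordonnees_rectangles hauteur largeur hauteur_fenetre → Spec_coordonnees_rectangles hauteur largeur hauteur_fenetre (coordonnees_rectangles hauteur largeur hauteur_fenetre)

-- ===== LEMMAS AND PROOFS =====

-- Clean structural reference: both ports are shown equal to this recursion.
def pvRef (hauteur largeur : List Int) (hauteur_fenetre d : Int) : List (List Int) :=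
  match hauteur, largeur with
  | h :: hs, l :: ls =>
      [d, hauteur_fenetre - h, d + l, hauteur_fenetre] :: pvRef hs ls hauteur_fenetre (d + l)
  | _, _ => []

-- Exclusive prefix sums starting after d.
def pvScan (d : Int) : List Int → List Int
  | [] => []
  | w :: ws => (d + w) :: pvScan (d + w) ws

lemma pvALoop_eq (hauteur largeur : List Int) (hf : Int) :
    ∀ i d acc, i ≤ hauteur.length → hauteur.length ≤ largeur.length →
    pvALoop hauteur largeur hf i d acc = acc ++ pvRef (hauteur.drop i) (largeur.drop i) hf d := by
  intro i
  induction hn : hauteur.length - i generalizing i with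
  | zero =>
    intro d acc hi hle
    have : i = hauteur.length := by omega
    subst this
    rw [pvALoop]
    simp [pvRef]
  | succ n ih =>
    intro d acc hi hle
    have hlt : i < hauteur.length := by omega
    have hlt2 : i < largeur.length := by omega
    have hdh := List.drop_eq_getElem_cons hlt
    have hdl := List.drop_eq_getElem_cons hlt2
    have hgh : PySem.List.pyGet? hauteur (i : Int) = some hauteur[i] := by
      simp [PySem.List.pyGet?_natCast, List.getElem?_eq_getElem hlt]
    have hgl : PySem.List.pyGet? largeur (i : Int) = some largeur[i] := by
      simp [PySem.List.pyGet?_natCast, List.getElem?_eq_getElem hlt2]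
    rw [pvALoop]
    simp only [hlt, dif_pos, hgh, hgl]
    rw [ih (i + 1) (by omega) (d + largeur[i]) _ (by omega) hle]
    rw [hdh, hdl, pvRef]
    simp

lemma pvOffsets_foldl (largeur : List Int) :
    ∀ (pre : List Int) (d : Int),
    largeur.foldl (fun os w => os ++ [os.getLastD 0 + w]) (pre ++ [d]) = pre ++ [d] ++ pvScan d largeur := by
  induction largeur with
  | nil => intro pre d; simp [pvScan]
  | cons w ws ih =>
    intro pre d
    simp only [List.foldl_cons]
    have : (pre ++ [d]).getLastD 0 = d := by simp
    rw [this]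
    have := ih (pre ++ [d]) (d + w)
    simp only [List.append_assoc] at this ⊢
    rw [this, pvScan]
    simp

lemma pvZip_eq (hf : Int) :
    ∀ (hauteur largeur : List Int) (d : Int), hauteur.length ≤ largeur.length →
    ((d :: pvScan d largeur).zip (hauteur.zip largeur)).map
      (fun t => [t.1, hf - t.2.1, t.1 + t.2.2, hf]) = pvRef hauteur largeur hf d := by
  intro hauteur
  induction hauteur with
  | nil => intro largeur d _; simp [pvRef]
  | cons h hs ih =>
    intro largeur d hle
    match largeur with
    | [] => simp at hle
    | l :: ls =>
      simp only [pvScan, List.zip_cons_cons, List.map_cons, pvRef]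
      rw [← ih ls (d + l) (by simpa using hle)]

lemma alt_eq_ref (hauteur largeur : List Int) (hf : Int) (hle : hauteur.length ≤ largeur.length) :
    coordonnees_rectangles_alt hauteur largeur hf = pvRef hauteur largeur hf 0 := by
  unfold coordonnees_rectangles_alt pvOffsets
  have h0 : ([0] : List Int) = [] ++ [0] := rfl
  rw [h0, pvOffsets_foldl largeur [] 0]
  simpa using pvZip_eq hf hauteur largeur 0 hle

-- ===== VERDICT (by name: the statement is the Claim_ definition above) =====
theorem coordonnees_rectangles_spec : Claim_equal_coordonnees_rectangles := by
  intro hauteur largeur hf _ hpre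
  unfold Spec_coordonnees_rectangles coordonnees_rectangles
  rw [pvALoop_eq hauteur largeur hf 0 0 [] (by omega) hpre, alt_eq_ref hauteur largeur hf hpre]
  simp
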